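-- pv_equiv track=rewrite | github.com/violapterin/porphyrin | porphyrin/aid.py | find_wound
-- ===== SOURCE A (Python) =====
-- def give_escape_hypertext():
--    many_escape = {
--       '<': "&lt;",
--       '>': "&gt;",
--       '&': "&amp;",
--       '\"': "&quot;",
--       '\'': "&#39;",
--    }
--    return many_escape
--
-- def shall_agree_escape_hypertext(source, head_left):
--    many_escape = give_escape_hypertext()
--    for glyph, escape in many_escape.items():
--       head_right = head_left + len(escape)
--       piece = source[head_left: head_right]
--       if (piece == escape):
--          return True
--    return False
--
-- def find_wound(many_cut, source):
--    margin = 6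
--    half = int(len(source) / 2)
--    for cut in many_cut:
--       many_found = []
--       for index, glyph in enumerate(source):
--          if (glyph == cut):
--             many_found.append(index)
--       found = take_value_from_offset(half, many_found)
--       if shall_agree_escape_hypertext(source, found):
--          continue
--       if (found < margin) or (len(source) - found - 1 < margin):
--          continue
--       return found
--    return half
--
-- def take_value_from_offset(offset, queue):
--    if not queue:
--       return -1
--    queue_offset = [index - offset for index in queue]
--    queue_offset.sort(key = abs)
--    queue_native = [index + offset for index in queue_offset]
--    return queue_native[0]
-- ===== SOURCE B (Python) =====
-- def find_wound(many_cut, source):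
--    margin = 6
--    n = len(source)
--    half = n // 2
--    positions = {}
--    for index, glyph in enumerate(source):
--       positions.setdefault(glyph, []).append(index)
--    escapes = ["&lt;", "&gt;", "&amp;", "&quot;", "&#39;"]
--    for cut in many_cut:
--       spots = positions.get(cut, [])
--       if not spots:
--          continue
--       found = min(spots, key=lambda index: abs(index - half))
--       if found < margin or n - found - 1 < margin:
--          continue
--       if any(source.startswith(escape, found) for escape in escapes):
--          continue
--       return found
--    return half
-- ===== Notes on version B (the rewrite author's own statement) =====
-- stated objective: faster
-- what changed: B indexes the source once into a char->occurrence-list dict and picks the occurrence nearest the center with a single min-by-distance scan, instead of A's full rescan of the source and stable sort of the offsets for every cut.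
import Mathlib
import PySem

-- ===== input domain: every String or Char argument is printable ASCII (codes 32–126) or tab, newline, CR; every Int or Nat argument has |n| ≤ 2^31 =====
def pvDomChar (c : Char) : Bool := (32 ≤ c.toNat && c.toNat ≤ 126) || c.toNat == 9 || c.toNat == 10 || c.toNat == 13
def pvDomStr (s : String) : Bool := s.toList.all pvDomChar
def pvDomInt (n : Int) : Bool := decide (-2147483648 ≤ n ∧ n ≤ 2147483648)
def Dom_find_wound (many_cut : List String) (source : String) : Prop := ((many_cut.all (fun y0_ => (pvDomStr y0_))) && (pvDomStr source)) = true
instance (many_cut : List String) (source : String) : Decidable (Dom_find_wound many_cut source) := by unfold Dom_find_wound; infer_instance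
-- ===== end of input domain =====

-- B indexes the source once into a char->occurrence-list dict and takes the occurrence nearest the
-- center by a single min-by-distance scan per cut, instead of A's rescan of the whole source and
-- stable sort of the offsets for every cut (objective: faster).

-- ===== PORT A =====
def give_escape_hypertext : PySem.Dict String String :=
  ((((PySem.Dict.empty.insert "<" "&lt;").insert ">" "&gt;").insert "&" "&amp;").insert "\"" "&quot;").insert "'" "&#39;"

def shall_agree_escape_hypertext (source : String) (head_left : Int) : Bool :=
  -- for-loop with 'return True' on a hit, 'return False' after = List.any over the dict items
  give_escape_hypertext.items.any (fun p =>
    let head_right := head_left + PySem.Str.len p.2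
    let piece := PySem.Str.slice source (some head_left) (some head_right)
    piece == p.2)

def take_value_from_offset (offset : Int) (queue : List Int) : Int :=
  if queue = [] then -1
  else
    let queue_offset := queue.map (fun index => index - offset)
    let queue_sorted := PySem.List.sorted queue_offset (fun x => |x|) false
    let queue_native := queue_sorted.map (fun index => index + offset)
    queue_native.headI            -- queue_native[0]; queue_native is nonempty here

def findWoundLoopA (source : String) (margin half : Int) : List String → Int
  | [] => half
  | cut :: rest =>
    let many_found := (PySem.List.enumerate source.toList 0).foldl
        (fun acc p => if String.ofList [p.2] == cut then acc ++ [p.1] else acc) []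
    let found := take_value_from_offset half many_found
    if shall_agree_escape_hypertext source found then findWoundLoopA source margin half rest
    else if found < margin ∨ PySem.Str.len source - found - 1 < margin then
      findWoundLoopA source margin half rest
    else found

def find_wound (many_cut : List String) (source : String) : Int :=
  let margin : Int := 6
  let half : Int := PySem.Int.truncdiv (PySem.Str.len source) 2   -- int(len(source) / 2)
  findWoundLoopA source margin half many_cut

-- ===== PORT B =====
def buildPositions (srcList : List Char) : PySem.Dict String (List Int) :=
  -- positions.setdefault(glyph, []).append(index)
  (PySem.List.enumerate srcList 0).foldl
    (fun d p => d.modify (String.ofList [p.2]) [] (fun l => l ++ [p.1])) PySem.Dict.empty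

def pvEscapes : List String := ["&lt;", "&gt;", "&amp;", "&quot;", "&#39;"]

def findWoundLoopB (positions : PySem.Dict String (List Int)) (srcList : List Char)
    (n margin half : Int) : List String → Int
  | [] => half
  | cut :: rest =>
    let spots := positions.getD cut []
    if spots = [] then findWoundLoopB positions srcList n margin half rest
    else
      -- min(spots, key=lambda index: abs(index - half)); spots is nonempty here
      let found := (PySem.List.min? spots (fun index => |index - half|)).getD 0
      if found < margin ∨ n - found - 1 < margin then
        findWoundLoopB positions srcList n margin half rest
      else if pvEscapes.any (fun e => PySem.Chars.startswith (srcList.drop found.toNat) e.toList) then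
        -- source.startswith(escape, found): exact for 0 ≤ found, which holds here (margin ≤ found)
        findWoundLoopB positions srcList n margin half rest
      else found

def find_wound_alt (many_cut : List String) (source : String) : Int :=
  let margin : Int := 6
  let n : Int := PySem.Str.len source
  let half : Int := PySem.Int.floordiv n 2
  findWoundLoopB (buildPositions source.toList) source.toList n margin half many_cut

-- ===== PRECONDITION & SPEC =====
def Spec_find_wound (many_cut : List String) (source : String) (out : Int) : Prop := out = find_wound_alt many_cut source
instance (many_cut : List String) (source : String) (out : Int) : Decidable (Spec_find_wound many_cut source out) := by unfold Spec_find_wound; infer_instance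

-- ===== CLAIM (what is proved, stated in full; the proofs are below) =====
def Claim_equal_find_wound : Prop := ∀ (many_cut : List String) (source : String), Dom_find_wound many_cut source → Spec_find_wound many_cut source (find_wound many_cut source)

-- ===== LEMMAS AND PROOFS =====

-- the step of Python's min-fold, named so the same matcher appears on both sides of the proofs
def minStep (key : Int → Int) (s : Option Int) (x : Int) : Option Int :=
  match s with
  | none => some x
  | some m => if key x < key m then some x else some m

theorem min?_eq_foldl_minStep (l : List Int) (key : Int → Int) :
    PySem.List.min? l key = l.foldl (minStep key) none := by
  unfold PySem.List.min? minStep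
  congr 1
  funext s x
  cases s <;> rfl

-- head of an insertBy step, as the min?-fold step
theorem head?_insertBy (before : Int → Int → Bool) (x : Int) (acc : List Int) :
    (PySem.List.insertBy before x acc).head? =
      some (match acc.head? with
            | none => x
            | some m => if before x m then x else m) := by
  cases acc with
  | nil => simp [PySem.List.insertBy]
  | cons y ys =>
    simp only [PySem.List.insertBy, List.head?_cons]
    split_ifs <;> simp

theorem head?_sorted_foldl (key : Int → Int) (l : List Int) (acc : List Int) :
    (l.foldl (fun acc x => PySem.List.insertBy (fun a b => decide (key a < key b)) x acc) acc).head? =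
      l.foldl (minStep key) acc.head? := by
  induction l generalizing acc with
  | nil => rfl
  | cons x xs ih =>
    simp only [List.foldl_cons]
    rw [ih, head?_insertBy]
    cases acc.head? with
    | none => rfl
    | some m => by_cases h : key x < key m <;> simp [minStep, h]

-- head of Python's stable sort = Python's min (first extremal element)
theorem head?_sorted_eq_min? (l : List Int) (key : Int → Int) :
    (PySem.List.sorted l key false).head? = PySem.List.min? l key := by
  rw [PySem.List.sorted_eq_foldl_insertBy, head?_sorted_foldl key l [],
    min?_eq_foldl_minStep]
  rfl

-- min over a shifted list
theorem min?_map_sub (l : List Int) (h : Int) :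
    PySem.List.min? (l.map (fun i => i - h)) (fun x => |x|) =
      (PySem.List.min? l (fun i => |i - h|)).map (fun i => i - h) := by
  rw [min?_eq_foldl_minStep, min?_eq_foldl_minStep, List.foldl_map]
  suffices aux : ∀ s : Option Int,
      l.foldl (fun acc x => minStep (fun x => |x|) acc (x - h)) (s.map (fun i => i - h)) =
        (l.foldl (minStep (fun i => |i - h|)) s).map (fun i => i - h) by
    simpa using aux none
  intro s
  induction l generalizing s with
  | nil => rfl
  | cons x xs ih =>
    simp only [List.foldl_cons]
    cases s with
    | none => exact ih (some x)
    | some m =>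
      simp only [minStep, Option.map_some]
      by_cases hc : |x - h| < |m - h| <;> simp only [hc, if_true, if_false]
      · exact ih (some x)
      · exact ih (some m)

-- A's nearest-to-offset selection is B's min-by-distance, on nonempty queues
theorem take_value_eq_min (offset : Int) (queue : List Int) (hne : queue ≠ []) :
    take_value_from_offset offset queue =
      (PySem.List.min? queue (fun index => |index - offset|)).getD 0 := by
  obtain ⟨m, hm⟩ : ∃ m, PySem.List.min? queue (fun index => |index - offset|) = some m := by
    cases hq : PySem.List.min? queue (fun index => |index - offset|) with
    | none => exact absurd ((PySem.List.min?_eq_none_iff _ _).mp hq) hne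
    | some m => exact ⟨m, rfl⟩
  have hhead : (PySem.List.sorted (queue.map (fun index => index - offset)) (fun x => |x|) false).head? =
      some (m - offset) := by
    rw [head?_sorted_eq_min?, min?_map_sub, hm]; rfl
  simp only [take_value_from_offset, if_neg hne]
  rw [hm]
  simp only [Option.getD_some]
  cases hs : PySem.List.sorted (queue.map (fun index => index - offset)) (fun x => |x|) false with
  | nil => rw [hs] at hhead; simp at hhead
  | cons a t =>
    rw [hs] at hhead
    simp only [List.head?_cons, Option.some_inj] at hhead
    simp only [List.map_cons, List.headI]
    omega

-- the dict built by B holds, per cut, exactly the index list A's scan builds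
theorem positions_getD (srcList : List Char) (cut : String) :
    (buildPositions srcList).getD cut [] =
      (PySem.List.enumerate srcList 0).foldl
        (fun acc p => if String.ofList [p.2] == cut then acc ++ [p.1] else acc) [] := by
  unfold buildPositions
  simp only [PySem.List.foldl_append_if]
  have : (PySem.List.enumerate srcList 0).foldl
        (fun d p => d.modify (String.ofList [p.2]) [] (fun l => l ++ [p.1])) PySem.Dict.empty =
      ((PySem.List.enumerate srcList 0).map (fun p => (String.ofList [p.2], p.1))).foldl
        (fun d q => d.modify q.1 [] (fun l => l ++ [q.2])) PySem.Dict.empty := by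
    rw [List.foldl_map]
  rw [this, PySem.Dict.getD_foldl_modify_append, List.filter_map, List.map_map]
  simp [Function.comp_def]

-- one escape: the sliced piece equals the escape iff the escape starts at head_left
theorem piece_eq_iff (source : String) (m : Int) (hm : 0 ≤ m) (esc : String) :
    (PySem.Str.slice source (some m) (some (m + PySem.Str.len esc)) = esc) ↔
      PySem.Chars.startswith (source.toList.drop m.toNat) esc.toList = true := by
  have hslice : (PySem.Str.slice source (some m) (some (m + PySem.Str.len esc))).toList
      = (source.toList.drop m.toNat).take esc.toList.length := by
    rw [PySem.Str.toList_slice, PySem.Chars.slice_eq_listSlice, PySem.Str.len_eq,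
      PySem.List.slice_toNat _ hm (by omega)]
    congr 1
    omega
  rw [PySem.Chars.startswith_iff]
  constructor
  · intro h
    have heq : esc.toList = (source.toList.drop m.toNat).take esc.toList.length :=
      (congrArg String.toList h).symm.trans hslice
    rw [List.prefix_iff_eq_take]
    exact heq
  · intro h
    have h2 : (PySem.Str.slice source (some m) (some (m + PySem.Str.len esc))).toList = esc.toList :=
      hslice.trans (List.prefix_iff_eq_take.mp h).symm
    calc PySem.Str.slice source (some m) (some (m + PySem.Str.len esc))
        = String.ofList (PySem.Str.slice source (some m) (some (m + PySem.Str.len esc))).toList :=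
          String.ofList_toList.symm
      _ = String.ofList esc.toList := by rw [h2]
      _ = esc := String.ofList_toList

theorem escape_items :
    give_escape_hypertext.items =
      [("<", "&lt;"), (">", "&gt;"), ("&", "&amp;"), ("\"", "&quot;"), ("'", "&#39;")] := by
  decide

-- the escape test of A agrees with B's startswith test for nonnegative head_left
theorem shall_agree_eq_escAny (source : String) (m : Int) (hm : 0 ≤ m) :
    shall_agree_escape_hypertext source m =
      pvEscapes.any (fun e => PySem.Chars.startswith (source.toList.drop m.toNat) e.toList) := by
  rw [Bool.eq_iff_iff]
  simp only [shall_agree_escape_hypertext, escape_items, pvEscapes, List.any_cons, List.any_nil,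
    Bool.or_eq_true, beq_iff_eq]
  rw [piece_eq_iff source m hm "&lt;", piece_eq_iff source m hm "&gt;",
    piece_eq_iff source m hm "&amp;", piece_eq_iff source m hm "&quot;",
    piece_eq_iff source m hm "&#39;"]

theorem loops_eq (source : String) (cuts : List String) :
    findWoundLoopA source 6 (PySem.Int.floordiv (PySem.Str.len source) 2) cuts =
      findWoundLoopB (buildPositions source.toList) source.toList (PySem.Str.len source) 6
        (PySem.Int.floordiv (PySem.Str.len source) 2) cuts := by
  induction cuts with
  | nil => rfl
  | cons cut rest ih =>
    set half := PySem.Int.floordiv (PySem.Str.len source) 2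
    set q := (PySem.List.enumerate source.toList 0).foldl
        (fun acc p => if String.ofList [p.2] == cut then acc ++ [p.1] else acc) ([] : List Int) with hq
    have hspots : (buildPositions source.toList).getD cut [] = q := positions_getD source.toList cut
    by_cases hemp : q = []
    · -- no occurrence: A computes found = -1 and continues; B skips the empty spot list
      have hA : take_value_from_offset half q = -1 := by
        rw [hemp]; simp [take_value_from_offset]
      simp only [findWoundLoopA, findWoundLoopB, hspots, ← hq, hA]
      rw [if_pos hemp]
      split_ifs with h1 h2
      · exact ih
      · exact ih
      · exact absurd (Or.inl (by norm_num)) h2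
    · -- some occurrence: the chosen index is the same on both sides
      set m := (PySem.List.min? q (fun index => |index - half|)).getD 0 with hmdef
      have hA : take_value_from_offset half q = m := take_value_eq_min half q hemp
      simp only [findWoundLoopA, findWoundLoopB, hspots, ← hq, hA, ← hmdef]
      rw [if_neg hemp]
      by_cases hmarg : m < 6 ∨ PySem.Str.len source - m - 1 < 6
      · rw [if_pos hmarg]
        split_ifs with h1 <;> exact ih
      · rw [if_neg hmarg]
        have hm0 : 0 ≤ m := by omega
        rw [shall_agree_eq_escAny source m hm0]
        split_ifs with h1
        · exact ih
        · rfl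

theorem half_eq (source : String) :
    PySem.Int.truncdiv (PySem.Str.len source) 2 = PySem.Int.floordiv (PySem.Str.len source) 2 := by
  have h0 : 0 ≤ PySem.Str.len source := by rw [PySem.Str.len_eq]; positivity
  show (PySem.Str.len source).tdiv 2 = PySem.Int.floordiv (PySem.Str.len source) 2
  rw [Int.tdiv_eq_ediv_of_nonneg h0, PySem.Int.floordiv_eq_ediv_of_pos (by norm_num)]

-- ===== VERDICT (by name: the statement is the Claim_ definition above) =====
theorem find_wound_spec : Claim_equal_find_wound := by
  intro many_cut source _
  show find_wound many_cut source = find_wound_alt many_cut source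
  unfold find_wound find_wound_alt
  rw [half_eq]
  exact loops_eq source many_cut
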